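-- pv_equiv track=rewrite | github.com/peiyihe/Mem_RT_Genomics | code/sequence_to_signal.py | replace_continuous_signal
-- ===== SOURCE A (Python) =====
-- def replace_continuous_signal(arr, threshold=12):
--     """
--     12 same signal should all be mismatched in Analog CAM
--     """
--
--     if not arr:
--         return arr
--
--     new_arr = arr.copy()
--
--     current_value = None
--     current_count = 0
--     start_index = 0
--
--     for i in range(len(new_arr)):
--         if new_arr[i] == current_value:
--             current_count += 1
--         else:
--             if current_count >= threshold:
--                 new_arr[start_index:i] = [0] * current_count
--
--             current_value = new_arr[i]
--             current_count = 1
--             start_index = i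
--
--     if current_count >= threshold:
--         new_arr[start_index:] = [0] * current_count
--
--     return new_arr
-- ===== SOURCE B (Python) =====
-- def replace_continuous_signal(arr, threshold=12):
--     """
--     12 same signal should all be mismatched in Analog CAM
--     """
--     if not arr:
--         return arr
--     result = []
--     rest = arr
--     while rest:
--         v = rest[0]
--         k = 1
--         while k < len(rest) and rest[k] == v:
--             k += 1
--         result.extend([0] * k if k >= threshold else [v] * k)
--         rest = rest[k:]
--     return result
-- ===== Notes on version B (the rewrite author's own statement) =====
-- stated objective: simpler
-- what changed: B rebuilds the output run by run (inner scan finds each maximal run of equal values, then appends [0]*k or [v]*k to a fresh result list) instead of A's per-index current_value/count/start_index state machine with in-place slice overwrites on a copy.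
import Mathlib
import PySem

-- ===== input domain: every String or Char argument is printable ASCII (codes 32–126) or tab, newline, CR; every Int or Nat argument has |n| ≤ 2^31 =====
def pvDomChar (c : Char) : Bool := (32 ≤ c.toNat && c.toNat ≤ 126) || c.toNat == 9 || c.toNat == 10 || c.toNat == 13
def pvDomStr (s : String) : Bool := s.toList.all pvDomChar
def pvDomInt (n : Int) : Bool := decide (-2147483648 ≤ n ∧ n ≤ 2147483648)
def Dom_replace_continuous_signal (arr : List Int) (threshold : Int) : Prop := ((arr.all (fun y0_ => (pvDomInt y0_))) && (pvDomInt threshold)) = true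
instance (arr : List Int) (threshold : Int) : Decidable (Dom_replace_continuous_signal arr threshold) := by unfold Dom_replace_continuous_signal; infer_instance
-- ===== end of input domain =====

-- B rebuilds the output run by run (two-pointer run detection on a fresh result list) instead of
-- A's per-index state machine with in-place slice overwrites; same return value, no speed claim.

-- ===== PORT A =====
-- One loop iteration of A: state = (new_arr, current_value, current_count, start_index).
-- The slice assignment new_arr[start_index:i] = [0]*current_count (non-negative in-range bounds)
-- is ported exactly as take ++ replicate ++ drop. The `none` branch of pyGet? (IndexError) is
-- unreachable since i ranges over in-bounds indices; the state is left unchanged there.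
def pvStepA (threshold : Int) (s : List Int × Option Int × Int × Int) (i : Int) :
    List Int × Option Int × Int × Int :=
  match s with
  | (buf, cv, cc, si) =>
    match PySem.List.pyGet? buf i with
    | some x =>
      if some x = cv then (buf, cv, cc + 1, si)
      else
        let buf' := if cc ≥ threshold then
            buf.take si.toNat ++ List.replicate cc.toNat 0 ++ buf.drop i.toNat
          else buf
        (buf', some x, 1, i)
    | none => (buf, cv, cc, si)

-- The trailing `if current_count >= threshold: new_arr[start_index:] = [0]*current_count`.
def pvFinalA (threshold : Int) (s : List Int × Option Int × Int × Int) : List Int :=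
  match s with
  | (buf, _, cc, si) =>
    if cc ≥ threshold then buf.take si.toNat ++ List.replicate cc.toNat 0 else buf

def replace_continuous_signal (arr : List Int) (threshold : Int) : List Int :=
  if arr = [] then arr
  else
    pvFinalA threshold
      ((PySem.List.pyRange 0 (arr.length : Int) 1).foldl (pvStepA threshold) (arr, none, 0, 0))

-- ===== PORT B =====
-- Source B's outer while over the remaining suffix: k scans the current run (inner while = takeWhile
-- on the tail), the run contributes [0]*k or [v]*k, then rest = rest[k:] (dropWhile on the tail).
def pvGoB (threshold : Int) : List Int → List Int
  | [] => []
  | v :: rest =>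
    let k := (rest.takeWhile (fun x => x = v)).length + 1
    (if (k : Int) ≥ threshold then List.replicate k 0 else List.replicate k v)
      ++ pvGoB threshold (rest.dropWhile (fun x => x = v))
  termination_by l => l.length
  decreasing_by
    simpa using Nat.lt_succ_of_le (List.length_dropWhile_le _ _)

def replace_continuous_signal_alt (arr : List Int) (threshold : Int) : List Int :=
  if arr = [] then arr else pvGoB threshold arr

-- ===== PRECONDITION & SPEC =====
def Spec_replace_continuous_signal (arr : List Int) (threshold : Int) (out : List Int) : Prop := out = replace_continuous_signal_alt arr threshold
instance (arr : List Int) (threshold : Int) (out : List Int) : Decidable (Spec_replace_continuous_signal arr threshold out) := by unfold Spec_replace_continuous_signal; infer_instance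

-- ===== CLAIM (what is proved, stated in full; the proofs are below) =====
def Claim_equal_replace_continuous_signal : Prop := ∀ (arr : List Int) (threshold : Int), Dom_replace_continuous_signal arr threshold → Spec_replace_continuous_signal arr threshold (replace_continuous_signal arr threshold)

-- ===== LEMMAS AND PROOFS =====

-- What A's finalization does to a completed run (and B emits for it).
def pvFin (t : Int) (pend : List Int) : List Int :=
  if (pend.length : Int) ≥ t then List.replicate pend.length 0 else pend

lemma head?_dropWhile_false (p : Int → Bool) (l : List Int) (v : Int)
    (h : (l.dropWhile p).head? = some v) : p v = false := by
  induction l with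
  | nil => simp [List.dropWhile] at h
  | cons a l ih =>
    rw [List.dropWhile_cons] at h
    by_cases hp : p a
    · simp [hp] at h; exact ih h
    · simp [hp] at h; rw [← h]; simpa using hp

-- Scanning inside a run of v only bumps current_count.
lemma stepA_run (t : Int) (buf : List Int) (v : Int) (cc si : Int) (i k : Nat)
    (h : ∀ j, i ≤ j → j < i + k → buf[j]? = some v) :
    (List.range' i k).foldl (fun s (j : Nat) => pvStepA t s (j : Int)) (buf, some v, cc, si)
      = (buf, some v, cc + (k : Int), si) := by
  induction k generalizing i cc with
  | zero => simp
  | succ k ih =>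
    rw [List.range'_succ, List.foldl_cons]
    have hb : PySem.List.pyGet? buf (i : Int) = some v := by
      rw [PySem.List.pyGet?_natCast]; exact h i le_rfl (by omega)
    have hstep : pvStepA t (buf, some v, cc, si) (i : Int) = (buf, some v, cc + 1, si) := by
      simp [pvStepA, hb]
    rw [hstep, ih (cc + 1) (i + 1) (fun j h1 h2 => h j (by omega) (by omega))]
    have : cc + 1 + (k : Int) = cc + ((k : Nat) + 1 : Nat) := by push_cast; ring
    rw [this]

-- Main invariant: at a run boundary the loop, followed by the finalization, produces the
-- processed prefix P, the pending run finished off, and B's result on the remaining suffix.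
lemma loopA_runs (t : Int) (n : Nat) : ∀ (arr P pend : List Int) (cv : Option Int),
    arr.length = n →
    ((cv = none ∧ pend = []) ∨
      ∃ v, cv = some v ∧ pend = List.replicate pend.length v ∧ arr.head? ≠ some v) →
    pvFinalA t ((List.range' (P.length + pend.length) arr.length).foldl
        (fun s (j : Nat) => pvStepA t s (j : Int)) (P ++ (pend ++ arr), cv, (pend.length : Int), (P.length : Int)))
      = P ++ (pvFin t pend ++ pvGoB t arr) := by
  induction n using Nat.strong_induction_on with
  | _ n ih =>
  intro arr P pend cv hn hpend
  cases arr with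
  | nil =>
    by_cases hge : (pend.length : Int) ≥ t <;>
      simp [pvFinalA, pvFin, pvGoB, hge]
  | cons v rest =>
    have htw : rest.takeWhile (fun x => x = v)
        = List.replicate (rest.takeWhile (fun x => x = v)).length v := by
      rw [List.eq_replicate_iff]
      exact ⟨rfl, fun b hb => by simpa using List.mem_takeWhile_imp hb⟩
    set K := (rest.takeWhile (fun x => x = v)).length with hK
    set rest' := rest.dropWhile (fun x => x = v) with hrest'
    have harr : v :: rest = List.replicate (K + 1) v ++ rest' := by
      have := List.takeWhile_append_dropWhile (p := fun x => x = v) (l := rest)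
      calc v :: rest = v :: (rest.takeWhile (fun x => x = v) ++ rest') := by rw [this]
        _ = List.replicate (K + 1) v ++ rest' := by
            rw [htw]; simp [List.replicate_succ]
    have hhd : rest'.head? ≠ some v := by
      intro hcon
      have := head?_dropWhile_false (fun x => x = v) rest v hcon
      simp at this
    have hlen : (v :: rest).length = (K + 1) + rest'.length := by
      rw [harr]; simp
    set a := P.length + pend.length with ha
    -- split the index range: boundary index, the rest of the new run, then the suffix
    have hsplit : List.range' a (v :: rest).length
        = (List.range' a 1 ++ List.range' (a + 1) K) ++ List.range' (a + 1 + K) rest'.length := by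
      have e1 : List.range' a 1 ++ List.range' (a + 1) K = List.range' a (1 + K) :=
        List.range'_append_1
      have e2 : List.range' a (1 + K) ++ List.range' (a + (1 + K)) rest'.length
          = List.range' a (1 + K + rest'.length) := List.range'_append_1
      rw [hlen, e1, show a + 1 + K = a + (1 + K) by ring, e2,
        show K + 1 + rest'.length = 1 + K + rest'.length by ring]
    -- the boundary step: finish off pend, start the run of v
    have hidx : (P ++ (pend ++ v :: rest))[a]? = some v := by
      rw [← List.append_assoc]
      rw [List.getElem?_append_right (by simp [ha])]
      simp [ha]
    have hne : (some v = cv) = False := by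
      rcases hpend with ⟨hcv, _⟩ | ⟨w, hcv, _, hnev⟩
      · simp [hcv]
      · simp only [List.head?_cons, ne_eq] at hnev
        simp [hcv]; intro h; exact hnev (by rw [h])
    have hfin : pend.length = (pvFin t pend).length := by
      unfold pvFin; split <;> simp
    have hstep1 : pvStepA t (P ++ (pend ++ v :: rest), cv, (pend.length : Int), (P.length : Int)) (a : Int)
        = (P ++ (pvFin t pend ++ v :: rest), some v, 1, (a : Int)) := by
      have hget : PySem.List.pyGet? (P ++ (pend ++ v :: rest)) (a : Int) = some v := by
        rw [PySem.List.pyGet?_natCast]; exact hidx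
      simp only [pvStepA, hget, hne, if_false]
      congr 1
      unfold pvFin
      split
      · have hdrop : (P ++ (pend ++ v :: rest)).drop ((a : Int)).toNat = v :: rest := by
          have e1 : ((a : Nat) : Int).toNat = (P ++ pend).length := by simp [ha]; omega
          rw [← List.append_assoc, e1, List.drop_left]
        have htake : (P ++ (pend ++ v :: rest)).take ((P.length : Int)).toNat = P := by
          simp
        rw [hdrop, htake]; simp
      · rfl
    -- scanning the remaining K copies of v
    have hbuf2 : ∀ j, a + 1 ≤ j → j < a + 1 + K →
        (P ++ (pvFin t pend ++ v :: rest))[j]? = some v := by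
      intro j h1 h2
      rw [← List.append_assoc]
      rw [List.getElem?_append_right (by simp [← hfin]; omega)]
      rw [harr, List.getElem?_append_left (by simp [← hfin]; omega)]
      rw [List.getElem?_replicate]
      simp only [← hfin, List.length_append]
      split
      · rfl
      · omega
    have hrun := stepA_run t (P ++ (pvFin t pend ++ v :: rest)) v 1 (a : Int) (a + 1) K hbuf2
    -- recursive call on the suffix
    have hsmall : rest'.length < n := by
      have h := List.length_dropWhile_le (fun x => decide (x = v)) rest
      have h2 : rest'.length = (List.dropWhile (fun x => decide (x = v)) rest).length := by
        rw [hrest']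
      have h3 : (v :: rest).length = rest.length + 1 := by simp
      omega
    have hrec := ih rest'.length hsmall rest' (P ++ pvFin t pend)
      (List.replicate (K + 1) v) (some v) rfl (Or.inr ⟨v, rfl, by simp, hhd⟩)
    rw [hsplit, List.foldl_append, List.foldl_append]
    have h1 : List.foldl (fun s (j : Nat) => pvStepA t s (j : Int))
        (P ++ (pend ++ v :: rest), cv, (pend.length : Int), (P.length : Int)) (List.range' a 1)
        = (P ++ (pvFin t pend ++ v :: rest), some v, 1, (a : Int)) := by
      simp only [List.range'_one, List.foldl_cons, List.foldl_nil]
      exact hstep1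
    rw [h1, hrun]
    have hst : ((P ++ (pvFin t pend ++ v :: rest) : List Int), (some v : Option Int), (1 + (K : Int) : Int), ((a : Nat) : Int))
        = ((P ++ pvFin t pend) ++ (List.replicate (K + 1) v ++ rest'), some v,
            ((List.replicate (K + 1) v).length : Int), (((P ++ pvFin t pend).length : Nat) : Int)) := by
      refine Prod.ext ?_ (Prod.ext rfl (Prod.ext ?_ ?_))
      · simp [harr, List.append_assoc]
      · simp [Int.add_comm]
      · simp [← hfin, ha]
    have hidxeq : a + 1 + K = (P ++ pvFin t pend).length + (List.replicate (K + 1) v).length := by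
      simp [← hfin, ha]; omega
    rw [hst, hidxeq, hrec]
    -- reassemble the right-hand side
    have hgo : pvGoB t (v :: rest)
        = (if ((K + 1 : Nat) : Int) ≥ t then List.replicate (K + 1) 0 else List.replicate (K + 1) v)
            ++ pvGoB t rest' := by
      rw [pvGoB]
    have hfr : pvFin t (List.replicate (K + 1) v)
        = (if ((K + 1 : Nat) : Int) ≥ t then List.replicate (K + 1) 0 else List.replicate (K + 1) v) := by
      unfold pvFin; simp
    rw [hgo, hfr]
    rw [List.append_assoc]

-- ===== VERDICT (by name: the statement is the Claim_ definition above) =====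
theorem replace_continuous_signal_spec : Claim_equal_replace_continuous_signal := by
  intro arr t _
  unfold Spec_replace_continuous_signal replace_continuous_signal replace_continuous_signal_alt
  by_cases h : arr = []
  · simp [h]
  · simp only [h, if_false]
    rw [PySem.List.pyRange_zero_nat, List.foldl_map]
    have := loopA_runs t arr.length arr [] [] none rfl (Or.inl ⟨rfl, rfl⟩)
    simpa [pvFin, List.range_eq_range'] using this
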